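-- pv_equiv track=rewrite | github.com/mariaangelapellegrino/quality_clustering | src/mycluster.py | find_samples
-- ===== SOURCE A (Python) =====
-- def find_samples(column, uniques, dictionary):
--     maxcount = 0
--     maxw = ""
--     column = [x.lower() for x in column]
--
--     for w in uniques:
--         w = w.lower()
--         if dictionary.get(w) is not None:
--             return w
--         count = column.count(w)
--         if count > maxcount:
--             maxcount = count
--             maxw = w
--     return maxw
-- ===== SOURCE B (Python) =====
-- def find_samples(column, uniques, dictionary):
--     # Phase 1: first unique whose lowercased form is a dictionary key.
--     for w in uniques:
--         lw = w.lower()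
--         if dictionary.get(lw) is not None:
--             return lw
--     # Phase 2: no dictionary match -- frequency table once, then argmax over uniques.
--     counts = {}
--     for x in column:
--         k = x.lower()
--         counts[k] = counts.get(k, 0) + 1
--     best = 0
--     result = ""
--     for w in uniques:
--         lw = w.lower()
--         c = counts.get(lw, 0)
--         if c > best:
--             best = c
--             result = lw
--     return result
-- ===== Notes on version B (the rewrite author's own statement) =====
-- stated objective: faster
-- what changed: A interleaves the dictionary check with a column.count scan per unique; B splits it into an early-return dictionary pass and, only if none matches, a single-pass frequency table (hash counts) followed by an argmax over uniques, removing the inner column scan.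
import Mathlib
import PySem

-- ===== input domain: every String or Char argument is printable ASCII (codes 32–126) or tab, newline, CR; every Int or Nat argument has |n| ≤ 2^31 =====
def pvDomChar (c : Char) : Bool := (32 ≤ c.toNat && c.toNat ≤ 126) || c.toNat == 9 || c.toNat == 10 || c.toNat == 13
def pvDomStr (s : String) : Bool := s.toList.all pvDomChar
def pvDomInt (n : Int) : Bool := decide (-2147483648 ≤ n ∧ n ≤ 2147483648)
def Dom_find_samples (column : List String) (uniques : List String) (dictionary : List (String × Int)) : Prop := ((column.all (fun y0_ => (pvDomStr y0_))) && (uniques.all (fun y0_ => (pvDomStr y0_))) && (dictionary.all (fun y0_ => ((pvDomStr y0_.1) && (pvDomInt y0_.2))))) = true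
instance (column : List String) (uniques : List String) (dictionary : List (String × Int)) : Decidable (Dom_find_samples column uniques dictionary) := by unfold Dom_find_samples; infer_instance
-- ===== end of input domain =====

-- B replaces A's per-unique column.count scan by an early-return dictionary pass plus a single
-- frequency table built once, then an argmax over uniques (measured faster at the timing sizes).


-- ===== PORT A =====
def findLoopA (col : List String) (dictionary : List (String × Int)) : List String → Int → String → String
  | [], _, maxw => maxw
  | w :: ws, maxcount, maxw =>
    let lw := PySem.Str.lower w
    if (dictionary.lookup lw).isSome then lw
    else
      let count : Int := (PySem.List.count col lw : Int)
      if maxcount < count then findLoopA col dictionary ws count lw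
      else findLoopA col dictionary ws maxcount maxw

-- Port of A: lowers the column up front, then one interleaved loop over uniques.
def find_samples (column : List String) (uniques : List String) (dictionary : List (String × Int)) : String :=
  findLoopA (column.map PySem.Str.lower) dictionary uniques 0 ""


-- ===== PORT B =====
-- Phase 1 of B: first unique whose lowercase form is a dictionary key.
def firstDictB (dictionary : List (String × Int)) : List String → Option String
  | [] => none
  | w :: ws =>
    let lw := PySem.Str.lower w
    if (dictionary.lookup lw).isSome then some lw else firstDictB dictionary ws

-- Phase 2 of B: argmax over uniques against a precomputed count table.
def argmaxB (counts : PySem.Dict String Int) : List String → Int → String → String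
  | [], _, result => result
  | w :: ws, best, result =>
    let lw := PySem.Str.lower w
    let c := counts.getD lw 0
    if best < c then argmaxB counts ws c lw else argmaxB counts ws best result

def find_samples_alt (column : List String) (uniques : List String) (dictionary : List (String × Int)) : String :=
  match firstDictB dictionary uniques with
  | some w => w
  | none =>
    let counts := column.foldl
      (fun d x => d.insert (PySem.Str.lower x) (d.getD (PySem.Str.lower x) 0 + 1)) PySem.Dict.empty
    argmaxB counts uniques 0 ""


-- ===== PRECONDITION & SPEC =====
-- Pre_ excludes association lists in which a key occurs more than once: a Python dict cannot
-- contain duplicate keys, so such lists do not represent any input the Python function takes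
-- (no input A returns on is excluded).
def Pre_find_samples (column : List String) (uniques : List String) (dictionary : List (String × Int)) : Prop :=
  ∀ k ∈ dictionary.map Prod.fst, (dictionary.map Prod.fst).count k ≤ 1

instance (column : List String) (uniques : List String) (dictionary : List (String × Int)) : Decidable (Pre_find_samples column uniques dictionary) := by unfold Pre_find_samples; infer_instance

def pvWitness_find_samples : List String × List String × (List (String × Int)) :=
  (["Word", "word"], ["word", "other"], [("key", 3)])

def Spec_find_samples (column : List String) (uniques : List String) (dictionary : List (String × Int)) (out : String) : Prop := out = find_samples_alt column uniques dictionary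
instance (column : List String) (uniques : List String) (dictionary : List (String × Int)) (out : String) : Decidable (Spec_find_samples column uniques dictionary out) := by unfold Spec_find_samples; infer_instance

-- ===== CLAIM (what is proved, stated in full; the proofs are below) =====
def Claim_equal_find_samples : Prop := ∀ (column : List String) (uniques : List String) (dictionary : List (String × Int)), Dom_find_samples column uniques dictionary → Pre_find_samples column uniques dictionary → Spec_find_samples column uniques dictionary (find_samples column uniques dictionary)

-- ===== LEMMAS AND PROOFS =====

-- ===== VERDICT (by name: the statement is the Claim_ definition above) =====
theorem findLoopA_eq (col : List String) (dict : List (String × Int))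
    (counts : PySem.Dict String Int)
    (hc : ∀ w, counts.getD w 0 = (PySem.List.count col w : Int)) :
    ∀ (us : List String) (mc : Int) (mw : String),
      findLoopA col dict us mc mw =
        match firstDictB dict us with
        | some w => w
        | none => argmaxB counts us mc mw := by
  intro us
  induction us with
  | nil => intro mc mw; rfl
  | cons w ws ih =>
    intro mc mw
    simp only [findLoopA, firstDictB, argmaxB]
    by_cases h : (dict.lookup (PySem.Str.lower w)).isSome
    · simp [h]
    · simp only [h, Bool.false_eq_true, if_false]
      rw [hc]
      by_cases h2 : mc < (PySem.List.count col (PySem.Str.lower w) : Int)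
      · simp only [h2, if_pos]; exact ih _ _
      · simp only [h2, if_false]; exact ih _ _

theorem find_samples_spec : Claim_equal_find_samples := by
  intro column uniques dictionary _ _
  unfold Spec_find_samples find_samples find_samples_alt
  rw [findLoopA_eq (column.map PySem.Str.lower) dictionary]
  intro w
  have h := PySem.Dict.getD_foldl_insert_add_one (column.map PySem.Str.lower) PySem.Dict.empty w
  rw [List.foldl_map] at h
  rw [h, PySem.List.count_eq]
  simp
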